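-- pv_equiv track=rewrite | github.com/daniel-reich/turbo-robot | jwiJNMiCW6P5d2XXA_20.py | does_rhyme
-- ===== SOURCE A (Python) =====
-- def does_rhyme(txt1, txt2):
--   str1=""
--   str2=""
--   for i in txt1:
--     if not i in ['?','.','!']:
--       str1+=i
--   for j in txt2:
--     if not j in ['?','.','!']:
--       str2+=j
--   return str1[-1].lower()==str2[-1].lower()
-- ===== SOURCE B (Python) =====
-- def does_rhyme(txt1, txt2):
--     # Strip only trailing punctuation; interior punctuation never changes the
--     # last remaining character, so comparing the last characters is enough.
--     return txt1.rstrip('?.!')[-1].lower() == txt2.rstrip('?.!')[-1].lower()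
-- ===== Notes on version B (the rewrite author's own statement) =====
-- stated objective: faster
-- what changed: Instead of copying every non-punctuation character of both strings into freshly built strings, B strips only the trailing '?.!' run (str.rstrip) of each string and compares the last characters lowercased, touching only the tails.
import Mathlib
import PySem

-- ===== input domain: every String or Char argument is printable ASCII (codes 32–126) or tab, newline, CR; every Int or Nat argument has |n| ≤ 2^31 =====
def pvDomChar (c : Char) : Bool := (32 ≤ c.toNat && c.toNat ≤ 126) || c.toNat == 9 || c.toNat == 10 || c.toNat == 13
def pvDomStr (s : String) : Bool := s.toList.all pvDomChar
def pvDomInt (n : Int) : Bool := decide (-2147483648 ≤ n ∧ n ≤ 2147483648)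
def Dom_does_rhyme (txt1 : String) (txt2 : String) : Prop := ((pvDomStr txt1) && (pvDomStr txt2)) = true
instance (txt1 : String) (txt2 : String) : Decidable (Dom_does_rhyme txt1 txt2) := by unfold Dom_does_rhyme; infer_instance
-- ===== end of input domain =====

-- B strips only trailing '?.!' (str.rstrip) instead of copying both whole strings
-- with all punctuation removed; a timing run measured B faster.

-- ===== PORT A =====
-- str1 = "" ; for i in txt1: if not i in ['?','.','!']: str1 += i
def does_rhyme (txt1 : String) (txt2 : String) : Bool :=
  let str1 := txt1.toList.foldl
    (fun acc i => if !(['?', '.', '!'].contains i) then acc ++ [i] else acc) []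
  let str2 := txt2.toList.foldl
    (fun acc j => if !(['?', '.', '!'].contains j) then acc ++ [j] else acc) []
  -- str1[-1].lower() == str2[-1].lower(); IndexError (excluded by Pre_) hits the fallback
  match PySem.List.pyGet? str1 (-1), PySem.List.pyGet? str2 (-1) with
  | some a, some b => PySem.Chars.lowerChar a == PySem.Chars.lowerChar b
  | _, _ => false

-- ===== PORT B =====
-- txt.rstrip('?.!') exactly: drop the trailing run of '?.!' characters (CPython semantics)
def pvRstripPunct (txt : String) : List Char :=
  (txt.toList.reverse.dropWhile (fun c => ['?', '.', '!'].contains c)).reverse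

-- return txt1.rstrip('?.!')[-1].lower() == txt2.rstrip('?.!')[-1].lower()
def does_rhyme_alt (txt1 : String) (txt2 : String) : Bool :=
  match PySem.List.pyGet? (pvRstripPunct txt1) (-1) with
  | none => false
  | some a =>
    match PySem.List.pyGet? (pvRstripPunct txt2) (-1) with
    | none => false
    | some b => PySem.Chars.lowerChar a == PySem.Chars.lowerChar b

-- ===== PRECONDITION & SPEC =====
-- A (and B) raise IndexError when a string consists entirely of '?', '.', '!' (or is empty);
-- Pre_ excludes exactly those inputs.
def Pre_does_rhyme (txt1 : String) (txt2 : String) : Prop :=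
  (txt1.toList.any (fun c => !(['?', '.', '!'].contains c))) = true ∧
  (txt2.toList.any (fun c => !(['?', '.', '!'].contains c))) = true
instance (txt1 : String) (txt2 : String) : Decidable (Pre_does_rhyme txt1 txt2) := by
  unfold Pre_does_rhyme; infer_instance

def pvWitness_does_rhyme : String × String := ("Hello!", "below?.")

def Spec_does_rhyme (txt1 : String) (txt2 : String) (out : Bool) : Prop := out = does_rhyme_alt txt1 txt2
instance (txt1 : String) (txt2 : String) (out : Bool) : Decidable (Spec_does_rhyme txt1 txt2 out) := by unfold Spec_does_rhyme; infer_instance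

-- ===== CLAIM (what is proved, stated in full; the proofs are below) =====
def Claim_equal_does_rhyme : Prop := ∀ (txt1 : String) (txt2 : String), Dom_does_rhyme txt1 txt2 → Pre_does_rhyme txt1 txt2 → Spec_does_rhyme txt1 txt2 (does_rhyme txt1 txt2)

-- ===== LEMMAS AND PROOFS =====

-- xs[-1] is getLast?
theorem pv_pyGet_neg_one {α : Type} (xs : List α) : PySem.List.pyGet? xs (-1) = xs.getLast? := by
  cases xs with
  | nil => rfl
  | cons x xs =>
    simp [PySem.List.pyGet?, PySem.List.pyIdx?, List.getLast?_eq_getElem?]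

-- A's accumulation loop is a filter
theorem pv_loop_eq_filter (cs : List Char) :
    cs.foldl (fun acc i => if !(['?', '.', '!'].contains i) then acc ++ [i] else acc) [] =
      cs.filter (fun i => !(['?', '.', '!'].contains i)) := by
  rw [PySem.List.foldl_append_if]
  simp

-- head? of a filter skips the leading run of failing elements
theorem pv_head_filter (p : Char → Bool) (cs : List Char) :
    (cs.filter p).head? = (cs.dropWhile (fun c => !(p c))).head? := by
  induction cs with
  | nil => rfl
  | cons c cs ih =>
    by_cases h : p c = true <;> simp [h, ih]

-- last surviving char of A's filtered copy = last char of B's rstrip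
theorem pv_last_eq (txt : String) :
    (txt.toList.filter (fun i => !(['?', '.', '!'].contains i))).getLast? =
      (pvRstripPunct txt).getLast? := by
  unfold pvRstripPunct
  rw [List.getLast?_reverse, ← List.head?_reverse, ← List.filter_reverse, pv_head_filter]
  simp

-- ===== VERDICT (by name: the statement is the Claim_ definition above) =====
theorem does_rhyme_spec : Claim_equal_does_rhyme := by
  intro txt1 txt2 _ _
  unfold Spec_does_rhyme does_rhyme does_rhyme_alt
  simp only [pv_loop_eq_filter, pv_pyGet_neg_one, pv_last_eq]
  cases (pvRstripPunct txt1).getLast? <;> cases (pvRstripPunct txt2).getLast? <;> rfl
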